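-- pv_equiv track=rewrite | github.com/KaiManabe/mirs2302 | raspi/tuning_client.py | getamplitude
-- ===== SOURCE A (Python) =====
-- def getamplitude(data):
--     err_l = []
--     err_r = []
--     vl_target = []
--     vr_target = []
--     vl = []
--     vr = []
--     tl = []
--     tr = []
--     vl_relat = []
--     vr_relat = []
--     ampl = []
--     ampr = []
--
--     for i in range(max([len(data[0]),len(data[1]),len(data[2]),len(data[3])])):
--         if i+1 < len(data[0]) and i+1 < len(data[1]):
--             err_l.append(data[0][i] - data[1][i])
--             vl.append(data[0][i+1] - data[0][i])
--             vl_target.append(data[1][i+1] - data[1][i])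
--             vl_relat.append(vl[-1] - vl_target[-1])
--
--         if i+1 < len(data[2]) and i+1 < len(data[3]):
--             err_r.append(data[2][i] - data[3][i])
--             vr.append(data[2][i+1] - data[2][i])
--             vr_target.append(data[3][i+1] - data[3][i])
--             vr_relat.append(vr[-1] - vr_target[-1])
--
--     current_idx = 0
--     for i in range(len(vl)):
--         if vl_relat[i] < 0:
--             for ii in range(i):
--                 if vl_relat[i - ii - 1] < 0:
--                     break
--                 if vl_relat[i - ii - 1] > 0:
--                     if current_idx != 0:
--                         tl.append(i - current_idx)
--                         ampl.append(max(vl_relat[current_idx:i]) - min(vl_relat[current_idx:i]))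
--                     current_idx = i
--                     break
--
--     current_idx = 0
--     for i in range(len(vr)):
--         if vr_relat[i] < 0:
--             for ii in range(i):
--                 if vr_relat[i - ii - 1] < 0:
--                     break
--                 if vr_relat[i - ii - 1] > 0:
--                     if current_idx != 0:
--                         tr.append(i - current_idx)
--                         ampr.append(max(vr_relat[current_idx:i]) - min(vr_relat[current_idx:i]))
--                     current_idx = i
--                     break
--
--     return ampl, ampr
-- ===== SOURCE B (Python) =====
-- def getamplitude(data):
--     # Single pass per side: track the sign of the last nonzero relative-velocity
--     # sample and a running max/min of the current segment, instead of backward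
--     # rescans and slice max/min at every zero-crossing.
--     def seg(pos, tgt):
--         n = min(len(pos), len(tgt))
--         rel = [(pos[i + 1] - pos[i]) - (tgt[i + 1] - tgt[i]) for i in range(n - 1)]
--         amp = []
--         seen = False
--         mx = mn = 0
--         last_sign = 0
--         for v in rel:
--             if v < 0 and last_sign > 0:
--                 if seen:
--                     amp.append(mx - mn)
--                 seen = True
--                 mx = mn = v
--             elif seen:
--                 if v > mx:
--                     mx = v
--                 if v < mn:
--                     mn = v
--             if v != 0:
--                 last_sign = 1 if v > 0 else -1
--         return amp
--     return seg(data[0], data[1]), seg(data[2], data[3])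
-- ===== Notes on version B (the rewrite author's own statement) =====
-- stated objective: alternative
-- what changed: B builds each relative-velocity series with one comprehension over the overlapping prefix and detects zero-crossings in a single pass that tracks the sign of the last nonzero sample and a running max/min per segment, replacing A's per-negative-sample backward rescans and slice max()/min() recomputations.
import Mathlib
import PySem

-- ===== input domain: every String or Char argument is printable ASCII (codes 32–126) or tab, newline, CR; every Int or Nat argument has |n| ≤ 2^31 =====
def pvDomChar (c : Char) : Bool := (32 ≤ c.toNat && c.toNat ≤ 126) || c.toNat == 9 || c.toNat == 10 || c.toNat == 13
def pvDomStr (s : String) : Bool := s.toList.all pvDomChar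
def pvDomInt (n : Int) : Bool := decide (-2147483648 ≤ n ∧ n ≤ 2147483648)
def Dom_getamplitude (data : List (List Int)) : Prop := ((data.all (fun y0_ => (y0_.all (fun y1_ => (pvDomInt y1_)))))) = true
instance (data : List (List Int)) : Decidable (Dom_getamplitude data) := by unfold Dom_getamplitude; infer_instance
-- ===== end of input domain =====

-- B replaces A's backward rescan at each negative sample and its slice max()/min()
-- by a single pass per side tracking the last nonzero sign and a running max/min
-- (objective: alternative single-pass algorithm, same cost; neither mutates its input).

-- ===== PORT A =====
-- the body of A's 'if vl_relat[i - ii - 1] > 0:' branch (tl/tr are kept although A never returns them);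
-- the slice handed to max()/min() is nonempty whenever this runs, so '.getD 0' never fires
def pvAAct (rel : List Int) (i : Int) (st : Int × List Int × List Int) : Int × List Int × List Int :=
  if st.1 ≠ 0 then
    (i, st.2.1 ++ [i - st.1],
     st.2.2 ++ [(PySem.List.max? (PySem.List.slice rel (some st.1) (some i)) (fun y => y)).getD 0 -
                (PySem.List.min? (PySem.List.slice rel (some st.1) (some i)) (fun y => y)).getD 0])
  else (i, st.2.1, st.2.2)

-- A's inner 'for ii in range(i)' loop; both 'break's end the recursion
def pvAInner (rel : List Int) (i : Int) : List Int → Int × List Int × List Int → Int × List Int × List Int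
  | [], st => st
  | ii :: rest, st =>
    let v := PySem.List.pyGetD rel (i - ii - 1) 0
    if v < 0 then st
    else if v > 0 then pvAAct rel i st
    else pvAInner rel i rest st

-- one iteration of A's outer crossing loop (state: current_idx, tl, ampl)
def pvAOuterStep (rel : List Int) (st : Int × List Int × List Int) (i : Int) : Int × List Int × List Int :=
  if PySem.List.pyGetD rel i 0 < 0 then pvAInner rel i (PySem.List.pyRange 0 i 1) st else st

-- one iteration of A's first loop (state: err_l, vl, vl_target, vl_relat, err_r, vr, vr_target, vr_relat)
def pvLoop1Step (d0 d1 d2 d3 : List Int)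
    (st : List Int × List Int × List Int × List Int × List Int × List Int × List Int × List Int)
    (i : Int) :
    List Int × List Int × List Int × List Int × List Int × List Int × List Int × List Int :=
  match st with
  | (errl, vl, vlt, vlr, errr, vr, vrt, vrr) =>
    let (errl, vl, vlt, vlr) :=
      if i + 1 < (d0.length : Int) ∧ i + 1 < (d1.length : Int) then
        let errl := errl ++ [PySem.List.pyGetD d0 i 0 - PySem.List.pyGetD d1 i 0]
        let vl := vl ++ [PySem.List.pyGetD d0 (i + 1) 0 - PySem.List.pyGetD d0 i 0]
        let vlt := vlt ++ [PySem.List.pyGetD d1 (i + 1) 0 - PySem.List.pyGetD d1 i 0]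
        let vlr := vlr ++ [PySem.List.pyGetD vl (-1) 0 - PySem.List.pyGetD vlt (-1) 0]
        (errl, vl, vlt, vlr)
      else (errl, vl, vlt, vlr)
    let (errr, vr, vrt, vrr) :=
      if i + 1 < (d2.length : Int) ∧ i + 1 < (d3.length : Int) then
        let errr := errr ++ [PySem.List.pyGetD d2 i 0 - PySem.List.pyGetD d3 i 0]
        let vr := vr ++ [PySem.List.pyGetD d2 (i + 1) 0 - PySem.List.pyGetD d2 i 0]
        let vrt := vrt ++ [PySem.List.pyGetD d3 (i + 1) 0 - PySem.List.pyGetD d3 i 0]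
        let vrr := vrr ++ [PySem.List.pyGetD vr (-1) 0 - PySem.List.pyGetD vrt (-1) 0]
        (errr, vr, vrt, vrr)
      else (errr, vr, vrt, vrr)
    (errl, vl, vlt, vlr, errr, vr, vrt, vrr)

def getamplitude (data : List (List Int)) : List Int × List Int :=
  let d0 := PySem.List.pyGetD data 0 []
  let d1 := PySem.List.pyGetD data 1 []
  let d2 := PySem.List.pyGetD data 2 []
  let d3 := PySem.List.pyGetD data 3 []
  let M := (PySem.List.max? [(d0.length : Int), (d1.length : Int), (d2.length : Int), (d3.length : Int)]
              (fun y => y)).getD 0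
  match (PySem.List.pyRange 0 M 1).foldl (pvLoop1Step d0 d1 d2 d3) ([], [], [], [], [], [], [], []) with
  | (_errl, vl, _vlt, vlr, _errr, vr, _vrt, vrr) =>
    let resL := (PySem.List.pyRange 0 (vl.length : Int) 1).foldl (pvAOuterStep vlr) (0, [], [])
    let resR := (PySem.List.pyRange 0 (vr.length : Int) 1).foldl (pvAOuterStep vrr) (0, [], [])
    (resL.2.2, resR.2.2)

-- ===== PORT B =====
-- one iteration of B's single pass (state: seen, mx, mn, last_sign, amp)
def pvBStep (st : Bool × Int × Int × Int × List Int) (v : Int) : Bool × Int × Int × Int × List Int :=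
  match st with
  | (seen, mx, mn, ls, amp) =>
    let (seen, mx, mn, amp) :=
      if v < 0 ∧ 0 < ls then
        (true, v, v, if seen then amp ++ [mx - mn] else amp)
      else if seen then
        (seen, if mx < v then v else mx, if v < mn then v else mn, amp)
      else (seen, mx, mn, amp)
    (seen, mx, mn, if v ≠ 0 then (if 0 < v then 1 else -1) else ls, amp)

def pvSeg (pos tgt : List Int) : List Int :=
  let n : Int := min (pos.length : Int) (tgt.length : Int)
  let rel := (PySem.List.pyRange 0 (n - 1) 1).map (fun i =>
    (PySem.List.pyGetD pos (i + 1) 0 - PySem.List.pyGetD pos i 0) -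
    (PySem.List.pyGetD tgt (i + 1) 0 - PySem.List.pyGetD tgt i 0))
  (rel.foldl pvBStep (false, 0, 0, 0, [])).2.2.2.2

def getamplitude_alt (data : List (List Int)) : List Int × List Int :=
  (pvSeg (PySem.List.pyGetD data 0 []) (PySem.List.pyGetD data 1 []),
   pvSeg (PySem.List.pyGetD data 2 []) (PySem.List.pyGetD data 3 []))

-- ===== PRECONDITION & SPEC =====
-- Pre_ excludes only inputs with fewer than 4 channel lists, on which Python A raises IndexError
-- at data[0]..data[3] (B raises there too).
def Pre_getamplitude (data : List (List Int)) : Prop := 4 ≤ data.length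
instance (data : List (List Int)) : Decidable (Pre_getamplitude data) := by
  unfold Pre_getamplitude; infer_instance
def pvWitness_getamplitude : List (List Int) := [[0, 2, 1], [0, 0, 0], [1], [2, 2]]
def Spec_getamplitude (data : List (List Int)) (out : List Int × List Int) : Prop := out = getamplitude_alt data
instance (data : List (List Int)) (out : List Int × List Int) : Decidable (Spec_getamplitude data out) := by
  unfold Spec_getamplitude; infer_instance

-- ===== CLAIM (what is proved, stated in full; the proofs are below) =====
def Claim_equal_getamplitude : Prop :=
  ∀ (data : List (List Int)), Dom_getamplitude data → Pre_getamplitude data →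
    Spec_getamplitude data (getamplitude data)

-- ===== LEMMAS AND PROOFS =====

-- the value Python's backward scan finds: first nonzero among rel[k-1], rel[k-2], …, rel[0] (0 if none)
def pvLastNZ (rel : List Int) : Nat → Int
  | 0 => 0
  | k + 1 => if rel.getD k 0 ≠ 0 then rel.getD k 0 else pvLastNZ rel k

lemma pvAInner_eq (rel : List Int) (i : Int) :
    ∀ (j : Nat) (st : Int × List Int × List Int),
      pvAInner rel i (PySem.List.pyRange (i - (j : Int)) i 1) st =
        if 0 < pvLastNZ rel j then pvAAct rel i st else st := by
  intro j
  induction j with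
  | zero =>
    intro st
    simp [pvAInner, PySem.List.pyRange_one_eq_nil (le_refl i), pvLastNZ]
  | succ j ih =>
    intro st
    push_cast
    rw [PySem.List.pyRange_one_cons (by omega : i - ((j : Int) + 1) < i)]
    have h2 : i - ((j : Int) + 1) + 1 = i - (j : Int) := by ring
    have h1 : i - (i - ((j : Int) + 1)) - 1 = (j : Int) := by ring
    rw [pvAInner, h1, h2]
    simp only [PySem.List.pyGetD_natCast]
    rw [pvLastNZ]
    rcases lt_trichotomy (rel[j]?.getD 0) 0 with hv | hv | hv
    · simp [hv, not_lt.mpr (le_of_lt hv), ne_of_lt hv]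
    · simp [hv, ih st]
    · simp [hv, not_lt.mpr (le_of_lt hv), ne_of_gt hv]

lemma pvTakeSucc (rel : List Int) (c k : Nat) (hck : c ≤ k) (hk : k < rel.length) :
    (rel.drop c).take (k + 1 - c) = (rel.drop c).take (k - c) ++ [rel.getD k 0] := by
  have h1 : k + 1 - c = (k - c) + 1 := by omega
  rw [h1, List.take_add_one]
  have h2 : (rel.drop c)[k - c]? = some (rel.getD k 0) := by
    rw [List.getElem?_drop]
    have hck2 : c + (k - c) = k := by omega
    rw [hck2, List.getElem?_eq_getElem hk, List.getD_eq_getElem?_getD,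
      List.getElem?_eq_getElem hk]
    rfl
  rw [h2]
  rfl

lemma pvMaxAppend (l : List Int) (m v : Int) (h : PySem.List.max? l (fun y => y) = some m) :
    PySem.List.max? (l ++ [v]) (fun y => y) = some (max m v) := by
  cases l with
  | nil => exact absurd h (by rw [show PySem.List.max? ([] : List Int) (fun y => y) = none from rfl]; simp)
  | cons x t =>
    rw [PySem.List.max?_id_cons] at h
    injection h with h
    rw [List.cons_append, PySem.List.max?_id_cons, List.foldl_append]
    simp [h]

lemma pvMinAppend (l : List Int) (m v : Int) (h : PySem.List.min? l (fun y => y) = some m) :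
    PySem.List.min? (l ++ [v]) (fun y => y) = some (min m v) := by
  cases l with
  | nil => exact absurd h (by rw [show PySem.List.min? ([] : List Int) (fun y => y) = none from rfl]; simp)
  | cons x t =>
    rw [PySem.List.min?_id_cons] at h
    injection h with h
    rw [List.cons_append, PySem.List.min?_id_cons, List.foldl_append]
    simp [h]

lemma pvIfMax (a b : Int) : (if a < b then b else a) = max a b := by
  by_cases h : a < b
  · rw [if_pos h, max_eq_right h.le]
  · rw [if_neg h, max_eq_left (not_lt.mp h)]

lemma pvIfMin (a b : Int) : (if b < a then b else a) = min a b := by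
  by_cases h : b < a
  · rw [if_pos h, min_eq_right h.le]
  · rw [if_neg h, min_eq_left (not_lt.mp h)]

-- invariant tying A's outer-loop state to B's after the first k samples of rel
def pvInv (rel : List Int) (k : Nat) (a : Int × List Int × List Int)
    (b : Bool × Int × Int × Int × List Int) : Prop :=
  a.2.2 = b.2.2.2.2 ∧
  (0 < b.2.2.2.1 ↔ 0 < pvLastNZ rel k) ∧
  (b.1 = true → ∃ c : Nat, a.1 = (c : Int) ∧ 1 ≤ c ∧ c < k ∧
      PySem.List.max? ((rel.drop c).take (k - c)) (fun y => y) = some b.2.1 ∧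
      PySem.List.min? ((rel.drop c).take (k - c)) (fun y => y) = some b.2.2.1) ∧
  (b.1 = false → a.1 = 0)

lemma pvStep_inv (rel : List Int) (k : Nat) (hk : k < rel.length)
    (a : Int × List Int × List Int) (b : Bool × Int × Int × Int × List Int)
    (h : pvInv rel k a b) :
    pvInv rel (k + 1) (pvAOuterStep rel a (k : Int)) (pvBStep b (rel.getD k 0)) := by
  obtain ⟨cur, tl, amp⟩ := a
  obtain ⟨seen, mx, mn, ls, ampB⟩ := b
  obtain ⟨hamp, hls, hseenT, hseenF⟩ := h
  simp only at hamp hls hseenT hseenF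
  set w := rel.getD k 0 with hw
  have hNZ : pvLastNZ rel (k + 1) = if w ≠ 0 then w else pvLastNZ rel k := by rw [hw]; rfl
  have hv : PySem.List.pyGetD rel (k : Int) 0 = w := by
    rw [hw]; simp [List.getD_eq_getElem?_getD]
  have hInner : ∀ st, pvAInner rel (k : Int) (PySem.List.pyRange 0 (k : Int) 1) st =
      if 0 < pvLastNZ rel k then pvAAct rel (k : Int) st else st := by
    intro st
    have h0 := pvAInner_eq rel (k : Int) k st
    rwa [sub_self] at h0
  have htake1 : (rel.drop k).take 1 = [w] := by
    rw [hw]; simpa using pvTakeSucc rel k k le_rfl hk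
  have hTS : ∀ c : Nat, c < k → (rel.drop c).take (k + 1 - c) = (rel.drop c).take (k - c) ++ [w] := by
    intro c hc; rw [hw]; exact pvTakeSucc rel c k hc.le hk
  by_cases hneg : w < 0
  · have hne : w ≠ 0 := ne_of_lt hneg
    have hnp : ¬ (0 : Int) < w := not_lt.mpr hneg.le
    by_cases hpos : 0 < pvLastNZ rel k
    · -- zero-crossing step
      have hlsp : 0 < ls := hls.mpr hpos
      have hk1 : 1 ≤ k := by
        rcases Nat.eq_zero_or_pos k with h0 | h0
        · subst h0; simp [pvLastNZ] at hpos
        · exact h0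
      have hA : pvAOuterStep rel (cur, tl, amp) (k : Int) = pvAAct rel (k : Int) (cur, tl, amp) := by
        rw [pvAOuterStep, hv, if_pos hneg, hInner, if_pos hpos]
      have hB : pvBStep (seen, mx, mn, ls, ampB) w =
          (true, w, w, -1, if seen then ampB ++ [mx - mn] else ampB) := by
        simp [pvBStep, hneg, hlsp, hne, hnp]
      rw [hA, hB]
      have hiff : (0 < (-1 : Int)) ↔ 0 < pvLastNZ rel (k + 1) := by
        rw [hNZ, if_pos hne]; omega
      cases seen with
      | true =>
        obtain ⟨c, hcur, hc1, hck, hmax, hmin⟩ := hseenT rfl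
        have hcne : cur ≠ 0 := by rw [hcur]; exact_mod_cast (by omega : (c : Int) ≠ 0)
        have hAct : pvAAct rel (k : Int) (cur, tl, amp) =
            ((k : Int), tl ++ [(k : Int) - cur], amp ++ [mx - mn]) := by
          simp [pvAAct, hcur, PySem.List.slice_natCast, hmax, hmin]
          omega
        rw [hAct]
        exact ⟨by simp [hamp], hiff,
          fun _ => ⟨k, rfl, hk1, by omega, by rw [show k + 1 - k = 1 from by omega, htake1]; rfl,
            by rw [show k + 1 - k = 1 from by omega, htake1]; rfl⟩,
          by simp⟩
      | false =>
        have hcur : cur = 0 := hseenF rfl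
        have hAct : pvAAct rel (k : Int) (cur, tl, amp) = ((k : Int), tl, amp) := by
          simp [pvAAct, hcur]
        rw [hAct]
        exact ⟨by simp [hamp], hiff,
          fun _ => ⟨k, rfl, hk1, by omega, by rw [show k + 1 - k = 1 from by omega, htake1]; rfl,
            by rw [show k + 1 - k = 1 from by omega, htake1]; rfl⟩,
          by simp⟩
    · -- negative sample, no crossing: A unchanged, B only extends the running extrema
      have hlsn : ¬ 0 < ls := fun hc => hpos (hls.mp hc)
      have hcnd : ¬ (w < 0 ∧ 0 < ls) := fun hc => hlsn hc.2
      have hA : pvAOuterStep rel (cur, tl, amp) (k : Int) = (cur, tl, amp) := by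
        rw [pvAOuterStep, hv, if_pos hneg, hInner, if_neg hpos]
      rw [hA]
      have hiff : (0 < (-1 : Int)) ↔ 0 < pvLastNZ rel (k + 1) := by
        rw [hNZ, if_pos hne]; omega
      cases seen with
      | true =>
        obtain ⟨c, hcur, hc1, hck, hmax, hmin⟩ := hseenT rfl
        have hB : pvBStep (true, mx, mn, ls, ampB) w =
            (true, if mx < w then w else mx, if w < mn then w else mn, -1, ampB) := by
          simp [pvBStep, hcnd, hne, hnp]
        rw [hB]
        refine ⟨hamp, hiff, fun _ => ⟨c, hcur, hc1, by omega, ?_, ?_⟩, by simp⟩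
        · rw [hTS c hck, pvIfMax]; exact pvMaxAppend _ _ _ hmax
        · rw [hTS c hck, pvIfMin]; exact pvMinAppend _ _ _ hmin
      | false =>
        have hB : pvBStep (false, mx, mn, ls, ampB) w = (false, mx, mn, -1, ampB) := by
          simp [pvBStep, hcnd, hne, hnp]
        rw [hB]
        exact ⟨hamp, hiff, by simp, fun _ => hseenF rfl⟩
  · -- nonnegative sample: A's outer 'if' fails, B only extends the running extrema
    have hcnd : ¬ (w < 0 ∧ 0 < ls) := fun hc => hneg hc.1
    have hA : pvAOuterStep rel (cur, tl, amp) (k : Int) = (cur, tl, amp) := by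
      rw [pvAOuterStep, hv, if_neg hneg]
    rw [hA]
    have hls2 : (0 < if w ≠ 0 then (if 0 < w then (1 : Int) else -1) else ls) ↔
        0 < pvLastNZ rel (k + 1) := by
      rw [hNZ]
      by_cases hz : w = 0
      · simp [hz, hls]
      · have hpw : 0 < w := lt_of_le_of_ne (not_lt.mp hneg) (Ne.symm hz)
        simp [hz, hpw]
    cases seen with
    | true =>
      obtain ⟨c, hcur, hc1, hck, hmax, hmin⟩ := hseenT rfl
      have hB : pvBStep (true, mx, mn, ls, ampB) w =
          (true, if mx < w then w else mx, if w < mn then w else mn,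
           if w ≠ 0 then (if 0 < w then 1 else -1) else ls, ampB) := by
        simp [pvBStep, hcnd]
      rw [hB]
      refine ⟨hamp, hls2, fun _ => ⟨c, hcur, hc1, by omega, ?_, ?_⟩, by simp⟩
      · rw [hTS c hck, pvIfMax]; exact pvMaxAppend _ _ _ hmax
      · rw [hTS c hck, pvIfMin]; exact pvMinAppend _ _ _ hmin
    | false =>
      have hB : pvBStep (false, mx, mn, ls, ampB) w =
          (false, mx, mn, if w ≠ 0 then (if 0 < w then 1 else -1) else ls, ampB) := by
        simp [pvBStep, hcnd]
      rw [hB]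
      exact ⟨hamp, hls2, by simp, fun _ => hseenF rfl⟩

lemma pvLoop2_go (rel : List Int) :
    ∀ (j k : Nat), k + j = rel.length →
      ∀ (a : Int × List Int × List Int) (b : Bool × Int × Int × Int × List Int), pvInv rel k a b →
        ((PySem.List.pyRange (k : Int) (rel.length : Int) 1).foldl (pvAOuterStep rel) a).2.2 =
          ((rel.drop k).foldl pvBStep b).2.2.2.2 := by
  intro j
  induction j with
  | zero =>
    intro k hkl a b hinv
    have hk : k = rel.length := by omega
    subst hk
    rw [PySem.List.pyRange_one_eq_nil le_rfl, List.drop_length]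
    exact hinv.1
  | succ j ih =>
    intro k hkl a b hinv
    have hk : k < rel.length := by omega
    rw [PySem.List.pyRange_one_cons (by exact_mod_cast hk), List.drop_eq_getElem_cons hk,
      List.foldl_cons, List.foldl_cons,
      show ((k : Int) + 1) = ((k + 1 : Nat) : Int) from by push_cast; ring,
      show rel[k] = rel.getD k 0 from by
        rw [List.getD_eq_getElem?_getD, List.getElem?_eq_getElem hk]; rfl]
    exact ih (k + 1) (by omega) _ _ (pvStep_inv rel k hk a b hinv)

lemma pvLoop2_eq (rel : List Int) :
    ((PySem.List.pyRange 0 (rel.length : Int) 1).foldl (pvAOuterStep rel) (0, [], [])).2.2 =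
      (rel.foldl pvBStep (false, 0, 0, 0, [])).2.2.2.2 := by
  have h := pvLoop2_go rel rel.length 0 (by omega) (0, [], []) (false, 0, 0, 0, [])
    ⟨rfl, by simp [pvLastNZ], by simp, fun _ => rfl⟩
  simpa using h

lemma pvLoop1_eq (d0 d1 d2 d3 : List Int) (l : List Int) :
    ∀ (e1 v1 t1 r1 e2 v2 t2 r2 : List Int),
      l.foldl (pvLoop1Step d0 d1 d2 d3) (e1, v1, t1, r1, e2, v2, t2, r2) =
        (e1 ++ ((l.filter (fun i => decide (i + 1 < (d0.length : Int) ∧ i + 1 < (d1.length : Int)))).map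
              (fun i => PySem.List.pyGetD d0 i 0 - PySem.List.pyGetD d1 i 0)),
         v1 ++ ((l.filter (fun i => decide (i + 1 < (d0.length : Int) ∧ i + 1 < (d1.length : Int)))).map
              (fun i => PySem.List.pyGetD d0 (i + 1) 0 - PySem.List.pyGetD d0 i 0)),
         t1 ++ ((l.filter (fun i => decide (i + 1 < (d0.length : Int) ∧ i + 1 < (d1.length : Int)))).map
              (fun i => PySem.List.pyGetD d1 (i + 1) 0 - PySem.List.pyGetD d1 i 0)),
         r1 ++ ((l.filter (fun i => decide (i + 1 < (d0.length : Int) ∧ i + 1 < (d1.length : Int)))).map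
              (fun i => (PySem.List.pyGetD d0 (i + 1) 0 - PySem.List.pyGetD d0 i 0) -
                        (PySem.List.pyGetD d1 (i + 1) 0 - PySem.List.pyGetD d1 i 0))),
         e2 ++ ((l.filter (fun i => decide (i + 1 < (d2.length : Int) ∧ i + 1 < (d3.length : Int)))).map
              (fun i => PySem.List.pyGetD d2 i 0 - PySem.List.pyGetD d3 i 0)),
         v2 ++ ((l.filter (fun i => decide (i + 1 < (d2.length : Int) ∧ i + 1 < (d3.length : Int)))).map
              (fun i => PySem.List.pyGetD d2 (i + 1) 0 - PySem.List.pyGetD d2 i 0)),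
         t2 ++ ((l.filter (fun i => decide (i + 1 < (d2.length : Int) ∧ i + 1 < (d3.length : Int)))).map
              (fun i => PySem.List.pyGetD d3 (i + 1) 0 - PySem.List.pyGetD d3 i 0)),
         r2 ++ ((l.filter (fun i => decide (i + 1 < (d2.length : Int) ∧ i + 1 < (d3.length : Int)))).map
              (fun i => (PySem.List.pyGetD d2 (i + 1) 0 - PySem.List.pyGetD d2 i 0) -
                        (PySem.List.pyGetD d3 (i + 1) 0 - PySem.List.pyGetD d3 i 0)))) := by
  induction l with
  | nil => intro e1 v1 t1 r1 e2 v2 t2 r2; simp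
  | cons i l ih =>
    intro e1 v1 t1 r1 e2 v2 t2 r2
    rw [List.foldl_cons]
    simp only [pvLoop1Step, PySem.List.pyGetD_neg_one_append_singleton]
    by_cases hL : i + 1 < (d0.length : Int) ∧ i + 1 < (d1.length : Int) <;>
      by_cases hR : i + 1 < (d2.length : Int) ∧ i + 1 < (d3.length : Int) <;>
        simp only [hL, hR, if_neg, not_false_iff] <;>
      rw [ih] <;>
      simp [hL, hR, List.append_assoc]

lemma pvRangeRestrict (M m1 : Int) (h : m1 ≤ M) :
    (PySem.List.pyRange 0 M 1).filter (fun i => decide (i < m1)) = PySem.List.pyRange 0 m1 1 := by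
  by_cases hm : 0 ≤ m1
  · rw [PySem.List.pyRange_one_append 0 m1 M hm h, List.filter_append]
    have h1 : (PySem.List.pyRange 0 m1 1).filter (fun i => decide (i < m1)) =
        PySem.List.pyRange 0 m1 1 :=
      List.filter_eq_self.mpr (fun x hx => by
        have hb := (PySem.List.mem_pyRange_one.mp hx).2
        simpa using hb)
    have h2 : (PySem.List.pyRange m1 M 1).filter (fun i => decide (i < m1)) = [] :=
      List.filter_eq_nil_iff.mpr (fun x hx => by
        have hb := (PySem.List.mem_pyRange_one.mp hx).1
        simp only [decide_eq_true_eq]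
        omega)
    rw [h1, h2, List.append_nil]
  · rw [PySem.List.pyRange_one_eq_nil (by omega : m1 ≤ 0)]
    exact List.filter_eq_nil_iff.mpr (fun x hx => by
      have hb := (PySem.List.mem_pyRange_one.mp hx).1
      simp only [decide_eq_true_eq]
      omega)

lemma pvFilterMin (M a b : Int) (hM : a ≤ M) :
    (PySem.List.pyRange 0 M 1).filter (fun i => decide (i + 1 < a ∧ i + 1 < b)) =
      PySem.List.pyRange 0 (min a b - 1) 1 := by
  have hcong : (PySem.List.pyRange 0 M 1).filter (fun i => decide (i + 1 < a ∧ i + 1 < b)) =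
      (PySem.List.pyRange 0 M 1).filter (fun i => decide (i < min a b - 1)) :=
    List.filter_congr (fun x _ => by simp only [decide_eq_decide]; omega)
  rw [hcong, pvRangeRestrict M (min a b - 1) (by omega)]

lemma pvMain (d0 d1 d2 d3 : List Int) :
    (match (PySem.List.pyRange 0
        ((PySem.List.max? [(d0.length : Int), (d1.length : Int), (d2.length : Int), (d3.length : Int)]
            (fun y => y)).getD 0) 1).foldl
        (pvLoop1Step d0 d1 d2 d3) ([], [], [], [], [], [], [], []) with
     | (_errl, vl, _vlt, vlr, _errr, vr, _vrt, vrr) =>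
       (((PySem.List.pyRange 0 (vl.length : Int) 1).foldl (pvAOuterStep vlr) (0, [], [])).2.2,
        ((PySem.List.pyRange 0 (vr.length : Int) 1).foldl (pvAOuterStep vrr) (0, [], [])).2.2)) =
      (pvSeg d0 d1, pvSeg d2 d3) := by
  have hMs : PySem.List.max?
      [(d0.length : Int), (d1.length : Int), (d2.length : Int), (d3.length : Int)] (fun y => y) =
      some ([(d1.length : Int), (d2.length : Int), (d3.length : Int)].foldl max (d0.length : Int)) :=
    PySem.List.max?_id_cons _ _
  have hself : PySem.List.max?
      [(d0.length : Int), (d1.length : Int), (d2.length : Int), (d3.length : Int)] (fun y => y) =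
      some ((PySem.List.max?
        [(d0.length : Int), (d1.length : Int), (d2.length : Int), (d3.length : Int)]
          (fun y => y)).getD 0) := by
    rw [hMs]; rfl
  have hMax := PySem.List.max?_isMax hself
  have hle0 : (d0.length : Int) ≤ (PySem.List.max?
      [(d0.length : Int), (d1.length : Int), (d2.length : Int), (d3.length : Int)]
        (fun y => y)).getD 0 := by
    have := hMax _ (by simp : (d0.length : Int) ∈ _)
    simpa using this
  have hle2 : (d2.length : Int) ≤ (PySem.List.max?
      [(d0.length : Int), (d1.length : Int), (d2.length : Int), (d3.length : Int)]
        (fun y => y)).getD 0 := by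
    have := hMax _ (by simp : (d2.length : Int) ∈ _)
    simpa using this
  rw [pvLoop1_eq]
  simp only [List.nil_append]
  rw [pvFilterMin _ _ _ hle0, pvFilterMin _ _ _ hle2]
  simp only [Prod.mk.injEq, List.length_map]
  constructor
  · have h2 := pvLoop2_eq (List.map
      (fun i => (PySem.List.pyGetD d0 (i + 1) 0 - PySem.List.pyGetD d0 i 0) -
                (PySem.List.pyGetD d1 (i + 1) 0 - PySem.List.pyGetD d1 i 0))
      (PySem.List.pyRange 0 (min (d0.length : Int) (d1.length : Int) - 1) 1))
    rw [List.length_map] at h2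
    rw [h2]
    simp [pvSeg]
  · have h2 := pvLoop2_eq (List.map
      (fun i => (PySem.List.pyGetD d2 (i + 1) 0 - PySem.List.pyGetD d2 i 0) -
                (PySem.List.pyGetD d3 (i + 1) 0 - PySem.List.pyGetD d3 i 0))
      (PySem.List.pyRange 0 (min (d2.length : Int) (d3.length : Int) - 1) 1))
    rw [List.length_map] at h2
    rw [h2]
    simp [pvSeg]

-- ===== VERDICT (by name: the statement is the Claim_ definition above) =====
theorem getamplitude_spec : Claim_equal_getamplitude := by
  intro data _hdom _hpre
  show getamplitude data = getamplitude_alt data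
  unfold getamplitude getamplitude_alt
  exact pvMain _ _ _ _
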